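-- pv_equiv track=rewrite | github.com/zhaoyue-zephyrus/vito_dev | vito/infra/parallelism/tile_parallel.py | index_dot
-- ===== SOURCE A (Python) =====
-- from typing import List, Tuple, Optional
--
-- def index_dot(index: List[int], loop_size: List[int]) -> int:
--     """
--     Converts a list of indices into a single index, representing the position in a multi-dimensional space.
--
--     This method takes a list of indices and a list of loop sizes, and converts the list of indices into a single index
--     that corresponds to the position in a multi-dimensional space.
--
--     Args:
--         index (List[int]): A list of integers representing the position in the multi-dimensional space.
--         loop_size (List[int]): A list of integers representing the size of each dimension in the multi-dimensional space.
--
--     Returns: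
--         int: A single integer representing the position in the multi-dimensional space.
--     """
--     assert len(index) == len(loop_size)
--     dot_index = 0
--     strides = [1]
--     for i in range(len(loop_size) - 1, -1, -1):
--         strides.append(strides[-1] * loop_size[i])
--     strides.reverse()
--     strides = strides[1:]
--     assert len(index) == len(strides)
--     for i in range(len(index)):
--         dot_index += index[i] * strides[i]
--     return dot_index
-- ===== SOURCE B (Python) =====
-- def index_dot(index, loop_size):
--     assert len(index) == len(loop_size)
--     dot_index = 0
--     for idx, size in zip(index, loop_size):
--         dot_index = dot_index * size + idx
--     return dot_index
-- ===== Notes on version B (the rewrite author's own statement) =====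
-- stated objective: simpler
-- what changed: Replaces A's four passes (a backward loop building a cumulative-products strides array, a reverse, a slice, then a dot-product loop) with a single forward Horner pass dot = dot*size + idx over zip(index, loop_size).
import Mathlib
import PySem

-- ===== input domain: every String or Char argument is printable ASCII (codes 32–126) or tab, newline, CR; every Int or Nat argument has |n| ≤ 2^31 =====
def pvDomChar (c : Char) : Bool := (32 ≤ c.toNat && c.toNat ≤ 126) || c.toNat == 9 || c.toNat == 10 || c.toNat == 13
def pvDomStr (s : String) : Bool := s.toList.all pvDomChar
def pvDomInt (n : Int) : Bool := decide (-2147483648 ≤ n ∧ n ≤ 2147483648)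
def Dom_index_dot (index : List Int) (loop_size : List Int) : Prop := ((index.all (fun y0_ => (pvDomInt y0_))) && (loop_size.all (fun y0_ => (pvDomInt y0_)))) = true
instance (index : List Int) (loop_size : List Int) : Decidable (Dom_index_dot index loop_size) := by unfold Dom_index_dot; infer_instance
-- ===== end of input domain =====

-- B replaces A's strides-array construction (backward cumulative-product loop, reverse,
-- slice, dot-product loop) with a single forward Horner pass: simpler, same O(n) cost.

-- ===== PORT A =====
-- strides = [1]; for i in range(len(loop_size)-1, -1, -1): strides.append(strides[-1]*loop_size[i])
def pvStridesA (loop_size : List Int) : List Int :=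
  (PySem.List.pyRange ((loop_size.length : Int) - 1) (-1) (-1)).foldl
    (fun s i => s ++ [PySem.List.pyGetD s (-1) 0 * PySem.List.pyGetD loop_size i 0]) [1]

-- dot_index = 0; for i in range(len(index)): dot_index += index[i] * strides[i]
def pvDotA (index strides : List Int) : Int :=
  (PySem.List.pyRange 0 (index.length : Int) 1).foldl
    (fun d i => d + PySem.List.pyGetD index i 0 * PySem.List.pyGetD strides i 0) 0

def index_dot (index : List Int) (loop_size : List Int) : Int :=
  if index.length = loop_size.length then
    -- strides.reverse(); strides = strides[1:]  (the second assert always holds here)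
    pvDotA index (PySem.List.slice (pvStridesA loop_size).reverse (some 1) none)
  else 0  -- assert fails: excluded by Pre_index_dot

-- ===== PORT B =====
def index_dot_alt (index : List Int) (loop_size : List Int) : Int :=
  if index.length = loop_size.length then
    (index.zip loop_size).foldl (fun d p => d * p.2 + p.1) 0
  else 0  -- assert fails: excluded by Pre_index_dot

-- ===== PRECONDITION & SPEC =====
-- Python A raises AssertionError when the two lists have different lengths; excluded.
def Pre_index_dot (index : List Int) (loop_size : List Int) : Prop :=
  index.length = loop_size.length
instance (index : List Int) (loop_size : List Int) : Decidable (Pre_index_dot index loop_size) := by unfold Pre_index_dot; infer_instance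

def pvWitness_index_dot : List Int × List Int := ([1, 2], [3, 4])

def Spec_index_dot (index : List Int) (loop_size : List Int) (out : Int) : Prop := out = index_dot_alt index loop_size
instance (index : List Int) (loop_size : List Int) (out : Int) : Decidable (Spec_index_dot index loop_size out) := by unfold Spec_index_dot; infer_instance

-- ===== CLAIM (what is proved, stated in full; the proofs are below) =====
def Claim_equal_index_dot : Prop := ∀ (index : List Int) (loop_size : List Int), Dom_index_dot index loop_size → Pre_index_dot index loop_size → Spec_index_dot index loop_size (index_dot index loop_size)

-- ===== LEMMAS AND PROOFS =====

-- values appended to strides while scanning the reversed prefix, running product c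
def upsAux (r : List Int) (c : Int) : List Int :=
  match r with
  | [] => []
  | x :: t => (c * x) :: upsAux t (c * x)

-- strides[i] = product of loop_size after position i
def sufStrides (ls : List Int) : List Int :=
  match ls with
  | [] => []
  | _ :: t => t.prod :: sufStrides t

lemma upsAux_append (r s : List Int) (c : Int) :
    upsAux (r ++ s) c = upsAux r c ++ upsAux s (c * r.prod) := by
  induction r generalizing c with
  | nil => simp [upsAux]
  | cons y r' ih => simp [upsAux, ih, mul_assoc]

lemma strideLoop (ls : List Int) (k : Nat) (hk : k ≤ ls.length) (s : List Int) :
    (PySem.List.pyRange ((k : Int) - 1) (-1) (-1)).foldl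
      (fun s i => s ++ [PySem.List.pyGetD s (-1) 0 * PySem.List.pyGetD ls i 0]) s
    = s ++ upsAux ((ls.take k).reverse) (PySem.List.pyGetD s (-1) 0) := by
  induction k generalizing s with
  | zero =>
      rw [PySem.List.pyRange_neg_one_eq_nil (by omega)]
      simp [upsAux]
  | succ k ih =>
      have hlt : k < ls.length := by omega
      have hcons : PySem.List.pyRange ((((k : Nat) + 1 : Nat) : Int) - 1) (-1) (-1)
          = (k : Int) :: PySem.List.pyRange ((k : Int) - 1) (-1) (-1) := by
        push_cast
        rw [add_sub_cancel_right, PySem.List.pyRange_neg_one_cons (by omega)]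
      rw [hcons]
      simp only [List.foldl_cons]
      rw [ih (by omega)]
      have hget : PySem.List.pyGetD ls ((k : Int)) 0 = ls[k] := by
        rw [PySem.List.pyGetD_natCast]
        simp [List.getD, hlt]
      have hlast : PySem.List.pyGetD
          (s ++ [PySem.List.pyGetD s (-1) 0 * PySem.List.pyGetD ls ((k : Int)) 0]) (-1) 0
          = PySem.List.pyGetD s (-1) 0 * PySem.List.pyGetD ls ((k : Int)) 0 :=
        PySem.List.pyGetD_neg_one_append_singleton _ _ _
      rw [hlast, hget]
      have htake : (ls.take (k + 1)).reverse = ls[k] :: (ls.take k).reverse := by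
        rw [List.take_add_one]
        simp [hlt]
      rw [htake]
      simp [upsAux]

lemma stride_reverse (ls : List Int) (c : Int) :
    c :: upsAux ls.reverse c
      = ((sufStrides ls).map (fun y => y * c)).reverse ++ [ls.prod * c] := by
  induction ls generalizing c with
  | nil => simp [upsAux, sufStrides]
  | cons x t ih =>
      have h1 : (x :: t).reverse = t.reverse ++ [x] := by simp
      rw [h1, upsAux_append]
      have h2 : c :: (upsAux t.reverse c ++ upsAux [x] (c * t.reverse.prod))
          = (c :: upsAux t.reverse c) ++ upsAux [x] (c * t.reverse.prod) := by simp
      rw [h2, ih]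
      simp [upsAux, sufStrides]
      ring

-- B's fold: running value d contributes d * prod of the remaining sizes
lemma horner_shift (xs ys : List Int) (h : xs.length = ys.length) (d : Int) :
    (xs.zip ys).foldl (fun d p => d * p.2 + p.1) d
      = d * ys.prod + (xs.zip ys).foldl (fun d p => d * p.2 + p.1) 0 := by
  induction xs generalizing ys d with
  | nil =>
      cases ys with
      | nil => simp
      | cons y t => simp at h
  | cons x xs' ih =>
      cases ys with
      | nil => simp at h
      | cons y ys' =>
          simp only [List.zip_cons_cons, List.foldl_cons, List.prod_cons]
          rw [ih ys' (by simpa using h), ih ys' (by simpa using h) (0 * y + x)]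
          ring

-- the dot-product sum against suffix strides IS the Horner fold
lemma dot_eq_horner (xs ys : List Int) (h : xs.length = ys.length) :
    ((List.range xs.length).map
        (fun k => xs.getD k 0 * (sufStrides ys).getD k 0)).sum
      = (xs.zip ys).foldl (fun d p => d * p.2 + p.1) 0 := by
  induction xs generalizing ys with
  | nil => simp
  | cons x xs' ih =>
      cases ys with
      | nil => simp at h
      | cons y ys' =>
          have h' : xs'.length = ys'.length := by simpa using h
          simp only [List.length_cons, List.range_succ_eq_map, List.map_cons,
            List.map_map, List.sum_cons]
          have hmapeq : ((fun k => (x :: xs').getD k 0 * (sufStrides (y :: ys')).getD k 0) ∘ Nat.succ)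
              = fun k => xs'.getD k 0 * (sufStrides ys').getD k 0 := by
            funext k
            simp [sufStrides, List.getD]
          rw [hmapeq, ih ys' h']
          simp only [List.zip_cons_cons, List.foldl_cons]
          rw [horner_shift xs' ys' h' (0 * y + x)]
          simp only [List.getD_cons_zero, sufStrides]
          ring

-- ===== VERDICT (by name: the statement is the Claim_ definition above) =====
theorem index_dot_spec : Claim_equal_index_dot := by
  intro index loop_size _dom hpre
  have hlen : index.length = loop_size.length := hpre
  unfold Spec_index_dot index_dot index_dot_alt
  rw [if_pos hlen, if_pos hlen]
  unfold pvStridesA pvDotA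
  have hs0 := strideLoop loop_size loop_size.length le_rfl [1]
  simp only [List.take_length] at hs0
  have hc1 : PySem.List.pyGetD ([1] : List Int) (-1) 0 = 1 := by decide
  rw [hc1] at hs0
  rw [hs0]
  have hrev : (([1] ++ upsAux loop_size.reverse 1) : List Int).reverse
      = loop_size.prod :: sufStrides loop_size := by
    have hsr := stride_reverse loop_size 1
    simp only [mul_one] at hsr
    have hlist : ([1] ++ upsAux loop_size.reverse 1 : List Int)
        = 1 :: upsAux loop_size.reverse 1 := by simp
    rw [hlist, hsr]
    simp
  rw [hrev, PySem.List.slice_from_one]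
  simp only [List.tail_cons]
  rw [PySem.List.pyRange_zero_natCast, List.foldl_map]
  have hfold : ∀ (l : List Nat) (d : Int),
      l.foldl (fun d k => d + PySem.List.pyGetD index ((k : Nat) : Int) 0
        * PySem.List.pyGetD (sufStrides loop_size) ((k : Nat) : Int) 0) d
      = d + (l.map (fun k => index.getD k 0 * (sufStrides loop_size).getD k 0)).sum := by
    intro l
    induction l with
    | nil => simp
    | cons k t iht =>
        intro d
        simp only [PySem.List.pyGetD_natCast] at iht ⊢
        simp only [List.foldl_cons, List.map_cons, List.sum_cons]
        rw [iht]
        ring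
  rw [hfold]
  rw [dot_eq_horner index loop_size hlen]
  simp
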